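-- pv_equiv track=rewrite | github.com/kazamazza/pokerai | features/board_analyzer.py | _rank_cluster
-- ===== SOURCE A (Python) =====
-- from typing import List, cast, Literal
--
-- def _rank_cluster(ranks: List[int]) -> str:
--     if all(r <= 8 for r in ranks):
--         return "low"
--     elif all(r >= 9 for r in ranks):
--         return "high"
--     elif all(6 <= r <= 11 for r in ranks):
--         return "mid"
--     return "mixed"
-- ===== SOURCE B (Python) =====
-- def _rank_cluster(ranks):
--     # Each rank contributes a 3-bit compatibility mask: bit0 = fits "low" (r<=8),
--     # bit1 = fits "high" (r>=9), bit2 = fits "mid" (6<=r<=11). AND-fold all masks,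
--     # then decode the surviving bits in priority order low > high > mid.
--     mask = 7
--     for r in ranks:
--         mask &= (r <= 8) * 1 | (r >= 9) * 2 | (6 <= r <= 11) * 4
--     if mask & 1:
--         return "low"
--     if mask & 2:
--         return "high"
--     if mask & 4:
--         return "mid"
--     return "mixed"
-- ===== Notes on version B (the rewrite author's own statement) =====
-- stated objective: alternative
-- what changed: Replaces A's three staged all() scans by one pass that AND-folds a per-rank 3-bit compatibility mask (bit0 low, bit1 high, bit2 mid) and decodes the surviving bits in priority order.
import Mathlib
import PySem

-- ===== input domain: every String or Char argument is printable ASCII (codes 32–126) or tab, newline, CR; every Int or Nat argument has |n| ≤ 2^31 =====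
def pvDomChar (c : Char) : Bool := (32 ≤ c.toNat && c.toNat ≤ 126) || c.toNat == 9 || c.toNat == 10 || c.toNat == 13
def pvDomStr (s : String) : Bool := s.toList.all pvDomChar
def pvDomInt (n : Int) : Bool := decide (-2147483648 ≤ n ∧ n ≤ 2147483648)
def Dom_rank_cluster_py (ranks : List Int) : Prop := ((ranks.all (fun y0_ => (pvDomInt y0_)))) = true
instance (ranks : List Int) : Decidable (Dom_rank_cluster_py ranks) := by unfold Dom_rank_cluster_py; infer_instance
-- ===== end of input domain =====

-- B replaces A's three staged all() scans by a single AND-fold of per-rank 3-bit compatibility masks with a priority decode; objective: alternative.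

-- ===== PORT A =====
def rank_cluster_py (ranks : List Int) : String :=
  if ranks.all (fun r => r ≤ 8) then "low"
  else if ranks.all (fun r => 9 ≤ r) then "high"
  else if ranks.all (fun r => 6 ≤ r ∧ r ≤ 11) then "mid"
  else "mixed"

-- ===== PORT B =====
-- per-rank compatibility mask: bit0 = fits "low", bit1 = fits "high", bit2 = fits "mid"
def pvCode (r : Int) : Nat :=
  (if r ≤ 8 then 1 else 0) ||| (if 9 ≤ r then 2 else 0) ||| (if 6 ≤ r ∧ r ≤ 11 then 4 else 0)

def rank_cluster_py_alt (ranks : List Int) : String :=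
  let mask := ranks.foldl (fun m r => m &&& pvCode r) 7
  if mask &&& 1 ≠ 0 then "low"
  else if mask &&& 2 ≠ 0 then "high"
  else if mask &&& 4 ≠ 0 then "mid"
  else "mixed"

-- ===== PRECONDITION & SPEC =====
def Spec_rank_cluster_py (ranks : List Int) (out : String) : Prop := out = rank_cluster_py_alt ranks
instance (ranks : List Int) (out : String) : Decidable (Spec_rank_cluster_py ranks out) := by unfold Spec_rank_cluster_py; infer_instance

-- ===== CLAIM (what is proved, stated in full; the proofs are below) =====
def Claim_equal_rank_cluster_py : Prop := ∀ (ranks : List Int), Dom_rank_cluster_py ranks → Spec_rank_cluster_py ranks (rank_cluster_py ranks)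

-- ===== LEMMAS AND PROOFS =====
theorem pv_testBit_foldl (t : List Int) (m : Nat) (i : Nat) :
    (t.foldl (fun m r => m &&& pvCode r) m).testBit i
      = (m.testBit i && t.all (fun r => (pvCode r).testBit i)) := by
  induction t generalizing m with
  | nil => simp
  | cons a t ih =>
      simp [List.foldl_cons, ih, Nat.testBit_and, Bool.and_assoc]

theorem pv_and_pow_ne (m i : Nat) : (m &&& 2 ^ i ≠ 0) ↔ m.testBit i = true := by
  rw [Nat.and_two_pow]
  cases h : m.testBit i <;> simp [h]

theorem pv_code_bit0 (r : Int) : (pvCode r).testBit 0 = decide (r ≤ 8) := by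
  unfold pvCode; split_ifs <;> first | decide | (simp [Nat.testBit]; omega)
theorem pv_code_bit1 (r : Int) : (pvCode r).testBit 1 = decide (9 ≤ r) := by
  unfold pvCode; split_ifs <;> first | decide | (simp [Nat.testBit]; omega)
theorem pv_code_bit2 (r : Int) : (pvCode r).testBit 2 = decide (6 ≤ r ∧ r ≤ 11) := by
  unfold pvCode; split_ifs <;> first | decide | (simp [Nat.testBit]; omega)

-- ===== VERDICT (by name: the statement is the Claim_ definition above) =====
theorem rank_cluster_py_spec : Claim_equal_rank_cluster_py := by
  intro ranks _
  unfold Spec_rank_cluster_py rank_cluster_py rank_cluster_py_alt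
  have h1 := pv_and_pow_ne (ranks.foldl (fun m r => m &&& pvCode r) 7) 0
  have h2 := pv_and_pow_ne (ranks.foldl (fun m r => m &&& pvCode r) 7) 1
  have h4 := pv_and_pow_ne (ranks.foldl (fun m r => m &&& pvCode r) 7) 2
  simp only [pow_zero, pow_one, show (2:Nat)^2 = 4 from rfl] at h1 h2 h4
  simp only [h1, h2, h4, pv_testBit_foldl, pv_code_bit0, pv_code_bit1, pv_code_bit2,
    List.all_eq_true, decide_eq_true_eq,
    show Nat.testBit 7 0 = true from rfl, show Nat.testBit 7 1 = true from rfl,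
    show Nat.testBit 7 2 = true from rfl, Bool.true_and]
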